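-- pv_equiv track=rewrite | github.com/TanelPaal/Programming-Introductory-Course | ExtraMaterial/test5.py | only_one_pair
-- ===== SOURCE A (Python) =====
-- def only_one_pair(numbers: list) -> bool:
--     """
--     Whether the list only has one pair.
--
--     Function returns True, if the list only has one pair (two elements have the same value).
--     In other cases:
--      there are no elements with the same value
--      there are more than 2 elements with the same value
--      there are several pairs
--     returns False.
--
--     only_one_pair([1, 2, 3]) => False
--     only_one_pair([1]) => False
--     only_one_pair([1, 2, 3, 1]) => True
--     only_one_pair([1, 2, 1, 3, 1]) => False
--     only_one_pair([1, 2, 1, 3, 1, 2]) => False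
--     """
--     nr_of_pairs = 0
--     for i in range(len(numbers) - 1):
--         for j in range(i + 1, len(numbers)):
--             nr_of_elements = 0
--             if numbers[i] == numbers[j]:
--                 nr_of_elements += 1
--             if nr_of_elements == 1:
--                 nr_of_pairs += 1
--                 break
--     return nr_of_pairs == 1
-- ===== SOURCE B (Python) =====
-- def only_one_pair(numbers: list) -> bool:
--     return len(numbers) - len(set(numbers)) == 1
-- ===== Notes on version B (the rewrite author's own statement) =====
-- stated objective: faster
-- what changed: Replaces the O(n^2) nested break-on-first-match loops by a single cardinality comparison: the number of 'duplicate' indices equals len(numbers) - len(set(numbers)), so B builds the set once and tests that difference against 1.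
import Mathlib
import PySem

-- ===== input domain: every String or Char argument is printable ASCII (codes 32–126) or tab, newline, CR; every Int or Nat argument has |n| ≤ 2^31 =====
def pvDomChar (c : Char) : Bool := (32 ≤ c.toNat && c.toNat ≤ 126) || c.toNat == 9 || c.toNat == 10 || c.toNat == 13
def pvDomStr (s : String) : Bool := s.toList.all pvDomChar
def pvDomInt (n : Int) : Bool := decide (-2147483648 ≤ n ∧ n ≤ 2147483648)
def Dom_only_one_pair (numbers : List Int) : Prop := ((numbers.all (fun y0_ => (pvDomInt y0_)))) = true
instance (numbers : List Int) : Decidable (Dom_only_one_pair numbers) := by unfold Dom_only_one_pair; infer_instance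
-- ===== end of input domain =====

-- B replaces A's nested break-on-first-match loops by one cardinality comparison: len(numbers) - len(set(numbers)) == 1 (objective: faster).


-- ===== PORT A =====
def only_one_pair_inner (numbers : List Int) (i : Int) : List Int → Int
  | [] => 0
  | j :: js =>
    -- nr_of_elements is reset each iteration; it is 1 exactly when numbers[i] == numbers[j]
    let nr_of_elements : Int := if PySem.List.pyGetD numbers i 0 = PySem.List.pyGetD numbers j 0 then 1 else 0
    if nr_of_elements = 1 then 1  -- nr_of_pairs += 1; break
    else only_one_pair_inner numbers i js

-- indices produced by range are always in bounds, so pyGetD with default 0 is exact here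
def only_one_pair (numbers : List Int) : Bool :=
  let n : Int := numbers.length
  let nr_of_pairs : Int :=
    (PySem.List.pyRange 0 (n - 1) 1).foldl
      (fun acc i => acc + only_one_pair_inner numbers i (PySem.List.pyRange (i + 1) n 1)) 0
  decide (nr_of_pairs = 1)

-- ===== PORT B =====
def only_one_pair_alt (numbers : List Int) : Bool :=
  decide ((numbers.length : Int) - ((PySem.Set.ofList numbers).length : Int) = 1)

-- ===== PRECONDITION & SPEC =====
def Spec_only_one_pair (numbers : List Int) (out : Bool) : Prop := out = only_one_pair_alt numbers
instance (numbers : List Int) (out : Bool) : Decidable (Spec_only_one_pair numbers out) := by unfold Spec_only_one_pair; infer_instance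

-- ===== CLAIM (what is proved, stated in full; the proofs are below) =====
def Claim_equal_only_one_pair : Prop := ∀ (numbers : List Int), Dom_only_one_pair numbers → Spec_only_one_pair numbers (only_one_pair numbers)

-- ===== LEMMAS AND PROOFS =====

-- ===== VERDICT (by name: the statement is the Claim_ definition above) =====
-- inner loop returns 1 iff numbers[i] occurs among numbers[j] for j in the given index list
lemma inner_eq (xs : List Int) (i : Int) (js : List Int) :
    only_one_pair_inner xs i js =
      if PySem.List.pyGetD xs i 0 ∈ js.map (fun j => PySem.List.pyGetD xs j 0) then 1 else 0 := by
  induction js with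
  | nil => simp [only_one_pair_inner]
  | cons j js ih =>
    simp only [only_one_pair_inner, List.map_cons, List.mem_cons, ih]
    by_cases h : PySem.List.pyGetD xs i 0 = PySem.List.pyGetD xs j 0 <;> simp [h]

lemma inner_range (xs : List Int) (i : Int) (hi : 0 ≤ i) :
    only_one_pair_inner xs i (PySem.List.pyRange (i + 1) (xs.length : Int) 1) =
      if PySem.List.pyGetD xs i 0 ∈ xs.drop (i + 1).toNat then 1 else 0 := by
  have h := PySem.List.map_pyGetD_pyRange xs 0 (a := i + 1) (by omega)
  simp only [PySem.List.len_eq] at h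
  rw [inner_eq, h]

-- the structural count A computes: for each element, 1 if it re-occurs later
def dupCount : List Int → Int
  | [] => 0
  | x :: r => (if x ∈ r then 1 else 0) + dupCount r

lemma sum_term (xs : List Int) (b : Int) (hb : b = (xs.length : Int)) :
    ((PySem.List.pyRange 0 b 1).map
      (fun i => if PySem.List.pyGetD xs i 0 ∈ xs.drop (i + 1).toNat then (1 : Int) else 0)).sum
      = dupCount xs := by
  subst hb
  induction xs with
  | nil => simp [PySem.List.pyRange_one_eq_nil, dupCount]
  | cons x r ih =>
    have h1 : ((x :: r).length : Int) = (r.length : Int) + 1 := by simp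
    rw [h1, PySem.List.pyRange_one_cons (by positivity), List.map_cons, List.sum_cons]
    have hshift : PySem.List.pyRange (0 + 1) ((r.length : Int) + 1) 1
        = (PySem.List.pyRange 0 (r.length : Int) 1).map (fun k => k + 1) := by
      rw [PySem.List.pyRange_one, PySem.List.pyRange_one]
      simp [List.map_map, Function.comp_def, add_comm]
    rw [hshift, List.map_map]
    have hmap : ∀ i ∈ PySem.List.pyRange 0 ((r.length : Int)) 1,
        ((fun i => if PySem.List.pyGetD (x :: r) i 0 ∈ (x :: r).drop (i + 1).toNat then (1 : Int) else 0)
          ∘ (fun k => k + 1)) i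
        = (fun i => if PySem.List.pyGetD r i 0 ∈ r.drop (i + 1).toNat then (1 : Int) else 0) i := by
      intro i hi
      rcases (PySem.List.mem_pyRange_one).1 hi with ⟨h0, hlt⟩
      have hget : PySem.List.pyGetD (x :: r) (i + 1) 0 = PySem.List.pyGetD r i 0 := by
        obtain ⟨k, rfl⟩ := Int.eq_ofNat_of_zero_le h0
        have : ((k : Int) + 1) = ((k + 1 : Nat) : Int) := by push_cast; ring
        rw [this, PySem.List.pyGetD_natCast, PySem.List.pyGetD_natCast]
        simp
      have hdrop : (x :: r).drop ((i + 1) + 1).toNat = r.drop (i + 1).toNat := by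
        have : ((i + 1) + 1).toNat = (i + 1).toNat + 1 := by omega
        rw [this]; rfl
      simp only [Function.comp_apply, hget, hdrop]
    rw [List.map_congr_left hmap, ih]
    simp only [dupCount]
    have hx : PySem.List.pyGetD (x :: r) 0 0 = x := by
      simp
    have hd : (x :: r).drop ((0 : Int) + 1).toNat = r := by rfl
    rw [hx, hd]

-- the last index never has a later partner, so the range can be shortened by one
lemma range_shorten (xs : List Int) :
    ((PySem.List.pyRange 0 ((xs.length : Int) - 1) 1).map
      (fun i => if PySem.List.pyGetD xs i 0 ∈ xs.drop (i + 1).toNat then (1 : Int) else 0)).sum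
      = dupCount xs := by
  rcases xs with _ | ⟨x, r⟩
  · simp [PySem.List.pyRange_one_eq_nil, dupCount]
  · set ys := x :: r with hys
    have hlen : (1 : Int) ≤ (ys.length : Int) := by simp [hys]
    have hsplit : PySem.List.pyRange 0 ((ys.length : Int)) 1
        = PySem.List.pyRange 0 ((ys.length : Int) - 1) 1 ++ [(ys.length : Int) - 1] := by
      rw [PySem.List.pyRange_one_append 0 ((ys.length : Int) - 1) ((ys.length : Int))
        (by omega) (by omega)]
      congr 1
      have h2 := PySem.List.pyRange_one_singleton ((ys.length : Int) - 1)
      rwa [show ((ys.length : Int) - 1) + 1 = ((ys.length : Int)) from by ring] at h2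
    have hlast : (if PySem.List.pyGetD ys ((ys.length : Int) - 1) 0
        ∈ ys.drop (((ys.length : Int) - 1) + 1).toNat then (1 : Int) else 0) = 0 := by
      simp
    have := sum_term ys ((ys.length : Int)) rfl
    rw [hsplit, List.map_append, List.sum_append] at this
    simp only [List.map_cons, List.map_nil, List.sum_cons, List.sum_nil] at this
    rw [hlast] at this
    omega

-- dupCount equals length minus the number of distinct elements
lemma dupCount_eq (xs : List Int) :
    dupCount xs = (xs.length : Int) - (xs.toFinset.card : Int) := by
  induction xs with
  | nil => simp [dupCount]
  | cons x r ih =>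
    by_cases h : x ∈ r
    · have : (x :: r).toFinset.card = r.toFinset.card := by
        simp [List.toFinset_cons, Finset.insert_eq_self.2 (List.mem_toFinset.2 h)]
      simp only [dupCount, ih, this, h, if_pos]
      simp only [List.length_cons]; push_cast; ring
    · have : (x :: r).toFinset.card = r.toFinset.card + 1 := by
        simp [List.toFinset_cons,
          Finset.card_insert_of_notMem (fun hc => h (List.mem_toFinset.1 hc))]
      simp only [dupCount, ih, this, h, if_neg, not_false_iff]
      simp only [List.length_cons]; push_cast; ring

-- the distinct-element list has the cardinality of the finset of xs
lemma ofList_length (xs : List Int) :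
    (PySem.Set.ofList xs).length = xs.toFinset.card := by
  have hnd : (PySem.Set.ofList xs).Nodup := PySem.Set.nodup_ofList xs
  have hmem : (PySem.Set.ofList xs).toFinset = xs.toFinset := by
    ext a; simp [List.mem_toFinset, PySem.Set.mem_ofList]
  calc (PySem.Set.ofList xs).length = (PySem.Set.ofList xs).toFinset.card :=
        (List.toFinset_card_of_nodup hnd).symm
    _ = xs.toFinset.card := by rw [hmem]

theorem only_one_pair_spec : Claim_equal_only_one_pair := by
  intro xs _
  unfold Spec_only_one_pair only_one_pair only_one_pair_alt
  have hfold : (PySem.List.pyRange 0 ((xs.length : Int) - 1) 1).foldl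
      (fun acc i => acc + only_one_pair_inner xs i (PySem.List.pyRange (i + 1) (xs.length : Int) 1)) 0
      = dupCount xs := by
    rw [PySem.List.foldl_add]
    have hmap : ∀ i ∈ PySem.List.pyRange 0 ((xs.length : Int) - 1) 1,
        only_one_pair_inner xs i (PySem.List.pyRange (i + 1) (xs.length : Int) 1)
        = (fun i => if PySem.List.pyGetD xs i 0 ∈ xs.drop (i + 1).toNat then (1 : Int) else 0) i := by
      intro i hi
      rcases (PySem.List.mem_pyRange_one).1 hi with ⟨h0, _⟩
      exact inner_range xs i h0
    rw [List.map_congr_left hmap, range_shorten]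
    ring
  simp only [hfold, dupCount_eq, ofList_length]
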